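-- pv_equiv track=rewrite | github.com/frostburn/gym_puyopuyo | tests/test_bottom_field.py | _reference_valid_moves
-- ===== SOURCE A (Python) =====
-- def _reference_valid_moves(lines):
--     valid = []
--     for x in range(7):
--         if (lines[0] & (1 << x)) | (lines[0] & (2 << x)):
--             valid.append(False)
--         else:
--             valid.append(True)
--     for x in range(8):
--         if (lines[0] & (1 << x)) | (lines[1] & (1 << x)):
--             valid.append(False)
--         else:
--             valid.append(True)
--     return sum(v * (1 << i) for i, v in enumerate(valid))
-- ===== SOURCE B (Python) =====
-- def _reference_valid_moves(lines):
--     e0 = ~lines[0] & 0xFF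
--     e1 = ~lines[1] & 0xFF
--     h = e0 & (e0 >> 1) & 0x7F
--     v = e0 & e1
--     return h | (v << 7)
-- ===== Notes on version B (the rewrite author's own statement) =====
-- stated objective: simpler
-- what changed: B drops A's two boolean-list-building loops and the enumerate/weighted-sum pass, computing the same 15-bit move mask with a handful of bit-parallel operations: h = e0 & (e0>>1) & 0x7F and v = e0 & e1 on the complemented rows e0, e1, returning h | (v << 7).
import Mathlib
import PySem

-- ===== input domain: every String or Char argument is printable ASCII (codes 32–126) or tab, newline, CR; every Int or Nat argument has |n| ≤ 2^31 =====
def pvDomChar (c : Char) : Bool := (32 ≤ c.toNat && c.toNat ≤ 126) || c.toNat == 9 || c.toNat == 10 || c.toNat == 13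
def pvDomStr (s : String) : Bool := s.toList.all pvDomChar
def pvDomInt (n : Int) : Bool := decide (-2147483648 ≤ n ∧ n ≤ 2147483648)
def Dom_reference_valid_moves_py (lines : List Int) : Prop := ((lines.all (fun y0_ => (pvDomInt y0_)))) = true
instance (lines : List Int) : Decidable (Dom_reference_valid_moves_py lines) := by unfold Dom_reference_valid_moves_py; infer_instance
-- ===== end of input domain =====

-- B replaces A's two boolean-list-building loops and the enumerate-sum by a handful of
-- bit-parallel mask operations on the two rows (objective: simpler; no speed claim).

-- ===== PORT A =====
-- Python `1 << x` / `2 << x` with x from range(7)/range(8): x ≥ 0 there, so `.toNat`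
-- on the loop variable is exact.
def reference_valid_moves_py (lines : List Int) : Int :=
  let valid : List Bool :=
    (PySem.List.pyRange 0 7 1).foldl (fun valid x =>
      if PySem.Int.bor (PySem.Int.band (PySem.List.pyGetD lines 0 0) (1 <<< x.toNat))
                       (PySem.Int.band (PySem.List.pyGetD lines 0 0) (2 <<< x.toNat)) ≠ 0
      then valid ++ [false] else valid ++ [true]) []
  let valid : List Bool :=
    (PySem.List.pyRange 0 8 1).foldl (fun valid x =>
      if PySem.Int.bor (PySem.Int.band (PySem.List.pyGetD lines 0 0) (1 <<< x.toNat))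
                       (PySem.Int.band (PySem.List.pyGetD lines 1 0) (1 <<< x.toNat)) ≠ 0
      then valid ++ [false] else valid ++ [true]) valid
  ((PySem.List.enumerate valid 0).map
    (fun p => (if p.2 then (1 : Int) else 0) * ((1 : Int) <<< p.1.toNat))).sum

-- ===== PORT B =====
def reference_valid_moves_py_alt (lines : List Int) : Int :=
  let e0 := PySem.Int.band (Int.not (PySem.List.pyGetD lines 0 0)) 255
  let e1 := PySem.Int.band (Int.not (PySem.List.pyGetD lines 1 0)) 255
  let h := PySem.Int.band (PySem.Int.band e0 (e0 >>> (1 : Nat))) 127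
  let v := PySem.Int.band e0 e1
  PySem.Int.bor h (v <<< (7 : Nat))

-- ===== PRECONDITION & SPEC =====
-- lines[1] (and lines[0]) raise IndexError when the list has fewer than two elements.
def Pre_reference_valid_moves_py (lines : List Int) : Prop := 2 ≤ lines.length
instance (lines : List Int) : Decidable (Pre_reference_valid_moves_py lines) := by
  unfold Pre_reference_valid_moves_py; infer_instance
def pvWitness_reference_valid_moves_py : List Int := [5, 3]

def Spec_reference_valid_moves_py (lines : List Int) (out : Int) : Prop := out = reference_valid_moves_py_alt lines
instance (lines : List Int) (out : Int) : Decidable (Spec_reference_valid_moves_py lines out) := by unfold Spec_reference_valid_moves_py; infer_instance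

-- ===== CLAIM (what is proved, stated in full; the proofs are below) =====
def Claim_equal_reference_valid_moves_py : Prop := ∀ (lines : List Int), Dom_reference_valid_moves_py lines → Pre_reference_valid_moves_py lines → Spec_reference_valid_moves_py lines (reference_valid_moves_py lines)

-- ===== LEMMAS AND PROOFS =====

theorem pv_not_eq (a : Int) : Int.not a = -a - 1 := by
  cases a with
  | ofNat n => simp only [Int.not, Int.negSucc_eq, Int.ofNat_eq_natCast]; ring
  | negSucc n => simp only [Int.not, Int.negSucc_eq, Int.ofNat_eq_natCast]; ring

theorem pv_neg_emod (n : Nat) (M : Nat) (hM : 0 < M) :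
    (-((n : Int) + 1)) % (M : Int) = (M : Int) - 1 - ((n % M : Nat) : Int) := by
  have h0 : (M : Int) * ((n / M : Nat) : Int) + ((n % M : Nat) : Int) = (n : Int) := by
    exact_mod_cast Nat.div_add_mod n M
  have key : (-((n:Int)+1)) = ((M:Int) - 1 - ((n % M : Nat):Int)) + (M:Int) * (-(((n / M : Nat)):Int) - 1) := by
    rw [← h0]; ring
  have hr : ((n % M : Nat) : Int) < (M : Int) := by exact_mod_cast Nat.mod_lt n hM
  have hr0 : (0:Int) ≤ ((n % M : Nat) : Int) := by positivity
  rw [key, Int.add_mul_emod_self_left, Int.emod_eq_of_lt (by omega) (by omega)]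

-- Python's `a & (2^k - 1)` is `a % 2^k` (both Python-exact, every a)
theorem pv_band_mask (a : Int) (k : Nat) :
    PySem.Int.band a ((2 : Int) ^ k - 1) = a % ((2 : Int) ^ k) := by
  have hcast : ((2:Int)^k) = ((2^k : Nat) : Int) := by push_cast; ring
  rcases (by omega : 0 ≤ a ∨ a < 0) with ha | ha
  · obtain ⟨m, rfl⟩ : ∃ m : Nat, a = (m : Int) := ⟨a.toNat, (Int.toNat_of_nonneg ha).symm⟩
    have h1 : ((2:Int)^k - 1) = ((2^k - 1 : Nat) : Int) := by
      have : 1 ≤ 2^k := Nat.one_le_two_pow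
      push_cast [this]; ring
    rw [h1, PySem.Int.band_natCast, Nat.and_two_pow_sub_one_eq_mod, hcast, ← Int.natCast_emod]
  · obtain ⟨n, rfl⟩ : ∃ n : Nat, a = -((n:Int)+1) := by
      refine ⟨(-a-1).toNat, ?_⟩
      have := Int.toNat_of_nonneg (a := -a-1) (by omega); omega
    have hb : (0:Int) ≤ (2:Int)^k - 1 := by
      have : (0:Int) < 2^k := by positivity
      omega
    have hna : ¬ (0 ≤ -((n:Int)+1)) := by omega
    rw [PySem.Int.band, if_neg hna, if_pos hb]
    have h2 : (-(-((n:Int)+1)) - 1).toNat = n := by omega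
    have h3 : ((2:Int)^k - 1).toNat = 2^k - 1 := by
      have : 1 ≤ 2^k := Nat.one_le_two_pow
      omega
    rw [h2, h3, Nat.and_comm, Nat.and_two_pow_sub_one_eq_mod, hcast, pv_neg_emod n (2^k) (Nat.two_pow_pos k)]
    have h4 : n % 2^k < 2^k := Nat.mod_lt n (Nat.two_pow_pos k)
    have h5 : 1 ≤ 2^k := Nat.one_le_two_pow
    omega

-- Python's `a & 2^k` extracts bit k:  a & 2^k = 2^k * (a >> k & 1)  (every a)
theorem pv_band_pow (a : Int) (k : Nat) :
    PySem.Int.band a ((2 : Int) ^ k) = (2 : Int) ^ k * ((a / (2 : Int) ^ k) % 2) := by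
  have hcast : ((2:Int)^k) = ((2^k : Nat) : Int) := by push_cast; ring
  have hkpos : (0:Int) < (2:Int)^k := by positivity
  rcases (by omega : 0 ≤ a ∨ a < 0) with ha | ha
  · obtain ⟨m, rfl⟩ : ∃ m : Nat, a = (m : Int) := ⟨a.toNat, (Int.toNat_of_nonneg ha).symm⟩
    rw [hcast, PySem.Int.band_natCast, Nat.and_two_pow, Nat.toNat_testBit]
    have h6 : ((m / 2^k : Nat) : Int) % 2 = ((m / 2^k % 2 : Nat) : Int) := by omega
    have h7 : ((m : Int)) / ((2^k : Nat) : Int) = ((m / 2^k : Nat) : Int) := (Int.natCast_ediv m (2^k)).symm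
    rw [h7, h6]
    rcases (by omega : m / 2^k % 2 = 0 ∨ m / 2^k % 2 = 1) with h8 | h8 <;> rw [h8] <;> simp
  · obtain ⟨n, rfl⟩ : ∃ n : Nat, a = -((n:Int)+1) := by
      refine ⟨(-a-1).toNat, ?_⟩
      have := Int.toNat_of_nonneg (a := -a-1) (by omega); omega
    have hna : ¬ (0 ≤ -((n:Int)+1)) := by omega
    rw [PySem.Int.band, if_neg hna, if_pos (le_of_lt hkpos)]
    have h2 : (-(-((n:Int)+1)) - 1).toNat = n := by omega
    have h3 : ((2:Int)^k).toNat = 2^k := by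
      rw [hcast]; exact Int.toNat_natCast _
    rw [h2, h3, Nat.and_comm, Nat.and_two_pow, Nat.toNat_testBit]
    have hq : (-((n:Int)+1)) / ((2:Int)^k) = -((n / 2^k : Nat) : Int) - 1 := by
      have h0 : (n : Int) = ((2^k : Nat) : Int) * ((n / 2^k : Nat) : Int) + ((n % 2^k : Nat) : Int) := by
        exact_mod_cast (Nat.div_add_mod n (2^k)).symm
      have key : (-((n:Int)+1)) = (((2^k:Nat):Int) - 1 - ((n % 2^k : Nat):Int)) + ((2^k:Nat):Int) * (-(((n / 2^k : Nat)):Int) - 1) := by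
        rw [h0]; ring
      have h4 : n % 2^k < 2^k := Nat.mod_lt n (Nat.two_pow_pos k)
      rw [hcast, key, Int.add_mul_ediv_left _ _ (by omega : ((2^k:Nat):Int) ≠ 0),
        Int.ediv_eq_zero_of_lt (by omega) (by omega)]
      omega
    rw [hq]
    rcases (by omega : n / 2^k % 2 = 0 ∨ n / 2^k % 2 = 1) with h6 | h6
    · have h7 : (-((n / 2^k : Nat) : Int) - 1) % 2 = 1 := by omega
      rw [h6, h7, hcast]
      simp
    · have h7 : (-((n / 2^k : Nat) : Int) - 1) % 2 = 0 := by omega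
      rw [h6, h7, hcast]
      simp

theorem pv_expand : ∀ (k : Nat) (v : Nat), v < 2^k → (v : Int) = ((List.range k).map (fun x => ((v.testBit x).toNat * 2^x : Int))).sum
  | 0, v, h => by simp at h ⊢; omega
  | (k+1), v, h => by
    have ih := pv_expand k (v/2) (by omega)
    rw [List.range_succ_eq_map]
    simp only [List.map_cons, List.map_map, List.sum_cons, Function.comp_def, Nat.testBit_add_one, Nat.testBit_zero]
    have h2 : ((List.range k).map (fun x => (((v/2).testBit x).toNat * 2^(x+1) : Int))).sum
         = 2 * ((List.range k).map (fun x => (((v/2).testBit x).toNat * 2^x : Int))).sum := by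
      rw [← List.sum_map_mul_left]; congr 1; exact List.map_congr_left (fun x _ => by ring)
    rw [h2, ← ih]
    rcases (by omega : v % 2 = 1 ∨ v % 2 = 0) with h3 | h3 <;> simp [h3] <;> omega

theorem pv_nat_or_eq_zero (m n : Nat) : m ||| n = 0 ↔ m = 0 ∧ n = 0 := by
  constructor
  · intro h
    constructor
    · exact Nat.eq_of_testBit_eq (fun i => by
        have := congrArg (fun x => x.testBit i) h
        simp [Nat.testBit_or] at this ⊢
        exact this.1)
    · exact Nat.eq_of_testBit_eq (fun i => by
        have := congrArg (fun x => x.testBit i) h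
        simp [Nat.testBit_or] at this ⊢
        exact this.2)
  · rintro ⟨rfl, rfl⟩; rfl

theorem pv_bor_eq_zero (u v : Int) (hu : 0 ≤ u) (hv : 0 ≤ v) :
    PySem.Int.bor u v = 0 ↔ u = 0 ∧ v = 0 := by
  rw [PySem.Int.bor_of_nonneg hu hv]
  rw [show ((u.toNat ||| v.toNat : Nat) : Int) = 0 ↔ (u.toNat ||| v.toNat : Nat) = 0 from Int.natCast_eq_zero]
  rw [pv_nat_or_eq_zero]
  omega

-- the loop-body test of A, arithmetized
theorem pv_cond (u v : Int) (j m : Nat) :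
    (PySem.Int.bor (PySem.Int.band u ((2:Int)^j)) (PySem.Int.band v ((2:Int)^m)) = 0) ↔
      (u / (2:Int)^j % 2 = 0 ∧ v / (2:Int)^m % 2 = 0) := by
  have hj : (0:Int) < 2^j := by positivity
  have hm : (0:Int) < 2^m := by positivity
  have h1 : (0:Int) ≤ (2:Int)^j * (u / (2:Int)^j % 2) :=
    mul_nonneg (le_of_lt hj) (Int.emod_nonneg _ (by norm_num))
  have h2 : (0:Int) ≤ (2:Int)^m * (v / (2:Int)^m % 2) :=
    mul_nonneg (le_of_lt hm) (Int.emod_nonneg _ (by norm_num))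
  rw [pv_band_pow u j, pv_band_pow v m, pv_bor_eq_zero _ _ h1 h2,
    mul_eq_zero, mul_eq_zero]
  constructor
  · rintro ⟨h3 | h3, h4 | h4⟩ <;> first | exact ⟨h3, h4⟩ | omega
  · rintro ⟨h3, h4⟩; exact ⟨Or.inr h3, Or.inr h4⟩

def pvTerm (a b : Int) (x : Nat) : Int :=
  if x < 7 then (if a / 2^x % 2 = 0 ∧ a / 2^(x+1) % 2 = 0 then 2^x else 0)
  else (if a / 2^(x-7) % 2 = 0 ∧ b / 2^(x-7) % 2 = 0 then 2^x else 0)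

theorem pv_A_closed (a b : Int) (t : List Int) :
    reference_valid_moves_py (a::b::t) = ((List.range 15).map (pvTerm a b)).sum := by
  have hget0 : PySem.List.pyGetD (a::b::t) 0 0 = a := by simp [pysem]
  have hget1 : PySem.List.pyGetD (a::b::t) 1 0 = b := by simp [pysem]
  simp only [reference_valid_moves_py, hget0, hget1]
  have hstep1 : (fun (valid : List Bool) (x : Int) =>
      if PySem.Int.bor (PySem.Int.band a (1 <<< x.toNat)) (PySem.Int.band a (2 <<< x.toNat)) ≠ 0
      then valid ++ [false] else valid ++ [true])
    = (fun (valid : List Bool) (x : Int) => valid ++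
        [if PySem.Int.bor (PySem.Int.band a (1 <<< x.toNat)) (PySem.Int.band a (2 <<< x.toNat)) ≠ 0
         then false else true]) := by
    funext valid x; split_ifs <;> rfl
  have hstep2 : (fun (valid : List Bool) (x : Int) =>
      if PySem.Int.bor (PySem.Int.band a (1 <<< x.toNat)) (PySem.Int.band b (1 <<< x.toNat)) ≠ 0
      then valid ++ [false] else valid ++ [true])
    = (fun (valid : List Bool) (x : Int) => valid ++
        [if PySem.Int.bor (PySem.Int.band a (1 <<< x.toNat)) (PySem.Int.band b (1 <<< x.toNat)) ≠ 0
         then false else true]) := by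
    funext valid x; split_ifs <;> rfl
  rw [hstep1, hstep2, PySem.List.foldl_append_singleton_eq_map, PySem.List.foldl_append_singleton_eq_map]
  rw [show PySem.List.pyRange 0 7 1 = [0,1,2,3,4,5,6] from by decide,
      show PySem.List.pyRange 0 8 1 = [0,1,2,3,4,5,6,7] from by decide]
  simp only [List.map_cons, List.map_nil, List.nil_append, List.cons_append,
    PySem.List.enumerate_cons, PySem.List.enumerate_nil, List.sum_cons, List.sum_nil, ne_eq]
  norm_num
  simp only [(show Int.toNat 2 = 2 from rfl),
    (show Int.toNat 3 = 3 from rfl),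
    (show Int.toNat 4 = 4 from rfl),
    (show Int.toNat 5 = 5 from rfl),
    (show Int.toNat 6 = 6 from rfl),
    (show Int.toNat 7 = 7 from rfl),
    (show Int.toNat 8 = 8 from rfl),
    (show Int.toNat 9 = 9 from rfl),
    (show Int.toNat 10 = 10 from rfl),
    (show Int.toNat 11 = 11 from rfl),
    (show Int.toNat 12 = 12 from rfl),
    (show Int.toNat 13 = 13 from rfl),
    (show Int.toNat 14 = 14 from rfl)]
  simp only [Int.shiftLeft_eq]
  norm_num
  have c0 := pv_cond a a 0 1
  have c1 := pv_cond a a 1 2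
  have c2 := pv_cond a a 2 3
  have c3 := pv_cond a a 3 4
  have c4 := pv_cond a a 4 5
  have c5 := pv_cond a a 5 6
  have c6 := pv_cond a a 6 7
  have d0 := pv_cond a b 0 0
  have d1 := pv_cond a b 1 1
  have d2 := pv_cond a b 2 2
  have d3 := pv_cond a b 3 3
  have d4 := pv_cond a b 4 4
  have d5 := pv_cond a b 5 5
  have d6 := pv_cond a b 6 6
  have d7 := pv_cond a b 7 7
  norm_num at c0 c1 c2 c3 c4 c5 c6 d0 d1 d2 d3 d4 d5 d6 d7
  simp only [c0, c1, c2, c3, c4, c5, c6, d0, d1, d2, d3, d4, d5, d6, d7]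
  simp only [pvTerm, show List.range 15 = [0,1,2,3,4,5,6,7,8,9,10,11,12,13,14] from rfl,
    List.map_cons, List.map_nil, List.sum_cons, List.sum_nil]
  norm_num
  simp only [(show (1:Int) <<< (0:Int) = 1 from by decide),
    (show (1:Int) <<< (1:Int) = 2 from by decide),
    (show (1:Int) <<< (2:Int) = 4 from by decide),
    (show (1:Int) <<< (3:Int) = 8 from by decide),
    (show (1:Int) <<< (4:Int) = 16 from by decide),
    (show (1:Int) <<< (5:Int) = 32 from by decide),
    (show (1:Int) <<< (6:Int) = 64 from by decide),
    (show (1:Int) <<< (7:Int) = 128 from by decide),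
    (show (1:Int) <<< (8:Int) = 256 from by decide),
    (show (1:Int) <<< (9:Int) = 512 from by decide),
    (show (1:Int) <<< (10:Int) = 1024 from by decide),
    (show (1:Int) <<< (11:Int) = 2048 from by decide),
    (show (1:Int) <<< (12:Int) = 4096 from by decide),
    (show (1:Int) <<< (13:Int) = 8192 from by decide),
    (show (1:Int) <<< (14:Int) = 16384 from by decide)]
theorem pv_B_closed (a b : Int) (t : List Int) (rn sn : Nat)
    (ha : a % 256 = (rn : Int)) (hb : b % 256 = (sn : Int)) :
    reference_valid_moves_py_alt (a::b::t) =
      ((((((255 - rn) &&& ((255 - rn) >>> 1)) &&& 127) ||| (((255 - rn) &&& (255 - sn)) <<< 7) : Nat)) : Int) := by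
  have hget0 : PySem.List.pyGetD (a::b::t) 0 0 = a := by simp [pysem]
  have hget1 : PySem.List.pyGetD (a::b::t) 1 0 = b := by simp [pysem]
  simp only [reference_valid_moves_py_alt, hget0, hget1]
  rw [pv_not_eq, pv_not_eq,
    show (255:Int) = (2:Int)^8 - 1 from by norm_num, pv_band_mask, pv_band_mask]
  have he0 : (-a - 1) % (2:Int)^8 = ((255 - rn : Nat) : Int) := by
    have h1 : ((255 - rn : Nat) : Int) = 255 - (rn : Int) := by omega
    rw [h1, show ((2:Int)^8) = 256 from by norm_num]
    omega
  have he1 : (-b - 1) % (2:Int)^8 = ((255 - sn : Nat) : Int) := by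
    have h1 : ((255 - sn : Nat) : Int) = 255 - (sn : Int) := by omega
    rw [h1, show ((2:Int)^8) = 256 from by norm_num]
    omega
  rw [he0, he1,
    show (((255 - rn : Nat) : Int)) >>> (1:Nat) = (((255 - rn) >>> 1 : Nat) : Int) from rfl,
    PySem.Int.band_natCast,
    show (127:Int) = ((127:Nat):Int) from by norm_num,
    PySem.Int.band_natCast,
    PySem.Int.band_natCast,
    show (((255 - rn &&& 255 - sn : Nat) : Int)) <<< (7:Nat) = (((255 - rn &&& 255 - sn) <<< 7 : Nat) : Int) from rfl,
    PySem.Int.bor_natCast]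

theorem pv_decide_and_toNat (P Q : Prop) [Decidable P] [Decidable Q] :
    ((decide P && decide Q).toNat = if P ∧ Q then 1 else 0) := by
  by_cases hP : P <;> by_cases hQ : Q <;> simp [hP, hQ]

theorem pv_main (a b : Int) (rn sn : Nat)
    (ha : a % 256 = (rn : Int)) (hb : b % 256 = (sn : Int)) :
    ((List.range 15).map (pvTerm a b)).sum =
      ((((((255 - rn) &&& ((255 - rn) >>> 1)) &&& 127) ||| (((255 - rn) &&& (255 - sn)) <<< 7) : Nat)) : Int) := by
  have hWlt : ((((255 - rn) &&& ((255 - rn) >>> 1)) &&& 127) ||| (((255 - rn) &&& (255 - sn)) <<< 7)) < 2^15 := by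
    apply Nat.or_lt_two_pow
    · have h1 : (((255 - rn) &&& ((255 - rn) >>> 1)) &&& 127) ≤ 127 := Nat.and_le_right
      omega
    · have h2 : ((255 - rn) &&& (255 - sn)) ≤ 255 - rn := Nat.and_le_left
      rw [Nat.shiftLeft_eq]
      have h3 : (255 - rn) ≤ 255 := by omega
      have h4 : ((255 - rn) &&& (255 - sn)) * 2^7 ≤ 255 * 128 := by
        apply Nat.mul_le_mul <;> omega
      omega
  rw [pv_expand 15 _ hWlt]
  congr 1
  apply List.map_congr_left
  intro x hx
  have hx' : x < 15 := List.mem_range.mp hx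
  interval_cases x
  · have e1 : ((255 - rn) % 2 = 1) ↔ (2 ∣ a) := by omega
    have e2 : ((255 - rn) / 2 % 2 = 1) ↔ (2 ∣ a / 2) := by omega
    simp only [pvTerm, Nat.testBit_or, Nat.testBit_and, Nat.testBit_shiftLeft, Nat.testBit_shiftRight]
    simp only [Nat.testBit_eq_decide_div_mod_eq]
    norm_num [e1, e2, pv_decide_and_toNat]
  · have e1 : ((255 - rn) / 2 % 2 = 1) ↔ (2 ∣ a / 2) := by omega
    have e2 : ((255 - rn) / 4 % 2 = 1) ↔ (2 ∣ a / 4) := by omega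
    simp only [pvTerm, Nat.testBit_or, Nat.testBit_and, Nat.testBit_shiftLeft, Nat.testBit_shiftRight]
    simp only [Nat.testBit_eq_decide_div_mod_eq]
    norm_num [e1, e2, pv_decide_and_toNat]
  · have e1 : ((255 - rn) / 4 % 2 = 1) ↔ (2 ∣ a / 4) := by omega
    have e2 : ((255 - rn) / 8 % 2 = 1) ↔ (2 ∣ a / 8) := by omega
    simp only [pvTerm, Nat.testBit_or, Nat.testBit_and, Nat.testBit_shiftLeft, Nat.testBit_shiftRight]
    simp only [Nat.testBit_eq_decide_div_mod_eq]
    norm_num [e1, e2, pv_decide_and_toNat]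
  · have e1 : ((255 - rn) / 8 % 2 = 1) ↔ (2 ∣ a / 8) := by omega
    have e2 : ((255 - rn) / 16 % 2 = 1) ↔ (2 ∣ a / 16) := by omega
    simp only [pvTerm, Nat.testBit_or, Nat.testBit_and, Nat.testBit_shiftLeft, Nat.testBit_shiftRight]
    simp only [Nat.testBit_eq_decide_div_mod_eq]
    norm_num [e1, e2, pv_decide_and_toNat]
  · have e1 : ((255 - rn) / 16 % 2 = 1) ↔ (2 ∣ a / 16) := by omega
    have e2 : ((255 - rn) / 32 % 2 = 1) ↔ (2 ∣ a / 32) := by omega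
    simp only [pvTerm, Nat.testBit_or, Nat.testBit_and, Nat.testBit_shiftLeft, Nat.testBit_shiftRight]
    simp only [Nat.testBit_eq_decide_div_mod_eq]
    norm_num [e1, e2, pv_decide_and_toNat]
  · have e1 : ((255 - rn) / 32 % 2 = 1) ↔ (2 ∣ a / 32) := by omega
    have e2 : ((255 - rn) / 64 % 2 = 1) ↔ (2 ∣ a / 64) := by omega
    simp only [pvTerm, Nat.testBit_or, Nat.testBit_and, Nat.testBit_shiftLeft, Nat.testBit_shiftRight]
    simp only [Nat.testBit_eq_decide_div_mod_eq]
    norm_num [e1, e2, pv_decide_and_toNat]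
  · have e1 : ((255 - rn) / 64 % 2 = 1) ↔ (2 ∣ a / 64) := by omega
    have e2 : ((255 - rn) / 128 % 2 = 1) ↔ (2 ∣ a / 128) := by omega
    simp only [pvTerm, Nat.testBit_or, Nat.testBit_and, Nat.testBit_shiftLeft, Nat.testBit_shiftRight]
    simp only [Nat.testBit_eq_decide_div_mod_eq]
    norm_num [e1, e2, pv_decide_and_toNat]
  · have hH : ((255 - rn) &&& ((255 - rn) >>> 1)) &&& 127 ≤ 127 := Nat.and_le_right
    have f1 : ¬ (((((255 - rn) &&& ((255 - rn) >>> 1)) &&& 127) / 128) % 2 = 1) := by omega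
    have e1 : ((255 - rn) % 2 = 1) ↔ (2 ∣ a) := by omega
    have e2 : ((255 - sn) % 2 = 1) ↔ (2 ∣ b) := by omega
    simp only [pvTerm, Nat.testBit_or, Nat.testBit_and, Nat.testBit_shiftLeft, Nat.testBit_shiftRight]
    simp only [Nat.testBit_eq_decide_div_mod_eq]
    norm_num [e1, e2, f1, pv_decide_and_toNat]
  · have hH : ((255 - rn) &&& ((255 - rn) >>> 1)) &&& 127 ≤ 127 := Nat.and_le_right
    have f1 : ¬ (((((255 - rn) &&& ((255 - rn) >>> 1)) &&& 127) / 256) % 2 = 1) := by omega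
    have e1 : ((255 - rn) / 2 % 2 = 1) ↔ (2 ∣ a / 2) := by omega
    have e2 : ((255 - sn) / 2 % 2 = 1) ↔ (2 ∣ b / 2) := by omega
    simp only [pvTerm, Nat.testBit_or, Nat.testBit_and, Nat.testBit_shiftLeft, Nat.testBit_shiftRight]
    simp only [Nat.testBit_eq_decide_div_mod_eq]
    norm_num [e1, e2, f1, pv_decide_and_toNat]
  · have hH : ((255 - rn) &&& ((255 - rn) >>> 1)) &&& 127 ≤ 127 := Nat.and_le_right
    have f1 : ¬ (((((255 - rn) &&& ((255 - rn) >>> 1)) &&& 127) / 512) % 2 = 1) := by omega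
    have e1 : ((255 - rn) / 4 % 2 = 1) ↔ (2 ∣ a / 4) := by omega
    have e2 : ((255 - sn) / 4 % 2 = 1) ↔ (2 ∣ b / 4) := by omega
    simp only [pvTerm, Nat.testBit_or, Nat.testBit_and, Nat.testBit_shiftLeft, Nat.testBit_shiftRight]
    simp only [Nat.testBit_eq_decide_div_mod_eq]
    norm_num [e1, e2, f1, pv_decide_and_toNat]
  · have hH : ((255 - rn) &&& ((255 - rn) >>> 1)) &&& 127 ≤ 127 := Nat.and_le_right
    have f1 : ¬ (((((255 - rn) &&& ((255 - rn) >>> 1)) &&& 127) / 1024) % 2 = 1) := by omega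
    have e1 : ((255 - rn) / 8 % 2 = 1) ↔ (2 ∣ a / 8) := by omega
    have e2 : ((255 - sn) / 8 % 2 = 1) ↔ (2 ∣ b / 8) := by omega
    simp only [pvTerm, Nat.testBit_or, Nat.testBit_and, Nat.testBit_shiftLeft, Nat.testBit_shiftRight]
    simp only [Nat.testBit_eq_decide_div_mod_eq]
    norm_num [e1, e2, f1, pv_decide_and_toNat]
  · have hH : ((255 - rn) &&& ((255 - rn) >>> 1)) &&& 127 ≤ 127 := Nat.and_le_right
    have f1 : ¬ (((((255 - rn) &&& ((255 - rn) >>> 1)) &&& 127) / 2048) % 2 = 1) := by omega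
    have e1 : ((255 - rn) / 16 % 2 = 1) ↔ (2 ∣ a / 16) := by omega
    have e2 : ((255 - sn) / 16 % 2 = 1) ↔ (2 ∣ b / 16) := by omega
    simp only [pvTerm, Nat.testBit_or, Nat.testBit_and, Nat.testBit_shiftLeft, Nat.testBit_shiftRight]
    simp only [Nat.testBit_eq_decide_div_mod_eq]
    norm_num [e1, e2, f1, pv_decide_and_toNat]
  · have hH : ((255 - rn) &&& ((255 - rn) >>> 1)) &&& 127 ≤ 127 := Nat.and_le_right
    have f1 : ¬ (((((255 - rn) &&& ((255 - rn) >>> 1)) &&& 127) / 4096) % 2 = 1) := by omega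
    have e1 : ((255 - rn) / 32 % 2 = 1) ↔ (2 ∣ a / 32) := by omega
    have e2 : ((255 - sn) / 32 % 2 = 1) ↔ (2 ∣ b / 32) := by omega
    simp only [pvTerm, Nat.testBit_or, Nat.testBit_and, Nat.testBit_shiftLeft, Nat.testBit_shiftRight]
    simp only [Nat.testBit_eq_decide_div_mod_eq]
    norm_num [e1, e2, f1, pv_decide_and_toNat]
  · have hH : ((255 - rn) &&& ((255 - rn) >>> 1)) &&& 127 ≤ 127 := Nat.and_le_right
    have f1 : ¬ (((((255 - rn) &&& ((255 - rn) >>> 1)) &&& 127) / 8192) % 2 = 1) := by omega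
    have e1 : ((255 - rn) / 64 % 2 = 1) ↔ (2 ∣ a / 64) := by omega
    have e2 : ((255 - sn) / 64 % 2 = 1) ↔ (2 ∣ b / 64) := by omega
    simp only [pvTerm, Nat.testBit_or, Nat.testBit_and, Nat.testBit_shiftLeft, Nat.testBit_shiftRight]
    simp only [Nat.testBit_eq_decide_div_mod_eq]
    norm_num [e1, e2, f1, pv_decide_and_toNat]
  · have hH : ((255 - rn) &&& ((255 - rn) >>> 1)) &&& 127 ≤ 127 := Nat.and_le_right
    have f1 : ¬ (((((255 - rn) &&& ((255 - rn) >>> 1)) &&& 127) / 16384) % 2 = 1) := by omega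
    have e1 : ((255 - rn) / 128 % 2 = 1) ↔ (2 ∣ a / 128) := by omega
    have e2 : ((255 - sn) / 128 % 2 = 1) ↔ (2 ∣ b / 128) := by omega
    simp only [pvTerm, Nat.testBit_or, Nat.testBit_and, Nat.testBit_shiftLeft, Nat.testBit_shiftRight]
    simp only [Nat.testBit_eq_decide_div_mod_eq]
    norm_num [e1, e2, f1, pv_decide_and_toNat]

-- ===== VERDICT (by name: the statement is the Claim_ definition above) =====
theorem reference_valid_moves_py_spec : Claim_equal_reference_valid_moves_py := by
  intro lines _ hpre
  unfold Spec_reference_valid_moves_py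
  match lines, hpre with
  | (a :: b :: t), _ =>
    have ha0 : 0 ≤ a % 256 := Int.emod_nonneg a (by norm_num)
    have ha1 : a % 256 < 256 := Int.emod_lt_of_pos a (by norm_num)
    have hb0 : 0 ≤ b % 256 := Int.emod_nonneg b (by norm_num)
    have hb1 : b % 256 < 256 := Int.emod_lt_of_pos b (by norm_num)
    have ha : a % 256 = (((a % 256).toNat : Nat) : Int) := (Int.toNat_of_nonneg ha0).symm
    have hb : b % 256 = (((b % 256).toNat : Nat) : Int) := (Int.toNat_of_nonneg hb0).symm
    rw [pv_A_closed a b t, pv_B_closed a b t _ _ ha hb]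
    exact pv_main a b _ _ ha hb
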